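-- pv_equiv track=rewrite | github.com/jooaosanntos/python | p1ufcg/provas/prova2/ofuscador/sol1.py | troca_asteriscos
-- ===== SOURCE A (Python) =====
-- def troca_asteriscos(palavra):
--     nova_palavra = ""
--     palavra_anterior = ""
--     for elemento in palavra:
--         if elemento == " ":
--             for rep in range(len(palavra_anterior)):
--                 nova_palavra += "*"
--             palavra_anterior = ""
--         else:
--             palavra_anterior += elemento
--             nova_palavra += elemento
--     return nova_palavra
-- ===== SOURCE B (Python) =====
-- def troca_asteriscos(palavra):
--     words = palavra.split(" ")
--     result = words[0]
--     for prev, w in zip(words, words[1:]):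
--         result += "*" * len(prev) + w
--     return result
-- ===== Notes on version B (the rewrite author's own statement) =====
-- stated objective: simpler
-- what changed: Replaces A's character-by-character scan (previous-word accumulator plus an inner loop emitting one asterisk per character at each separator) with a split-first decomposition: split the string on the space separator once, then fold over adjacent word pairs appending the asterisk run for the left word and the right word.
import Mathlib
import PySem

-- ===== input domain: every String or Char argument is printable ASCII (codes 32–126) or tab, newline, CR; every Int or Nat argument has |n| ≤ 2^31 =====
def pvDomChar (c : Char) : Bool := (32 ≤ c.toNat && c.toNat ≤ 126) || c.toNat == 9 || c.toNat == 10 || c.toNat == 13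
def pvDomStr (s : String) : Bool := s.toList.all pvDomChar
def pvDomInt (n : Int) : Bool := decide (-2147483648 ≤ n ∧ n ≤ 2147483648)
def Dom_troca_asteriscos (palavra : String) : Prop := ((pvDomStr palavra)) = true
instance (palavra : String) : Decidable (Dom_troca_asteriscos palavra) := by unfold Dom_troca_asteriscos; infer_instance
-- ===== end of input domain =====

-- B replaces A's character-by-character scan with a split-on-space, fold-over-adjacent-word-pairs decomposition (objective: simpler).

-- ===== PORT A =====
-- literal port of A: scan the characters, keeping (nova_palavra, palavra_anterior)
def troca_asteriscos (palavra : String) : String :=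
  let r := palavra.toList.foldl
    (fun (st : List Char × List Char) elemento =>
      if elemento = ' ' then
        ((PySem.List.pyRange 0 (st.2.length : Int) 1).foldl (fun nv _ => nv ++ ['*']) st.1, [])
      else
        (st.1 ++ [elemento], st.2 ++ [elemento]))
    ([], [])
  String.ofList r.1

-- ===== PORT B =====
-- literal port of Source B: words = palavra.split(" "); result = words[0]; fold over zip(words, words[1:])
def troca_asteriscos_alt (palavra : String) : String :=
  let words := PySem.Chars.splitOn palavra.toList [' ']
  match words with
  | [] => ""   -- unreachable: str.split(sep) never returns an empty list
  | w0 :: rest =>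
    String.ofList (((w0 :: rest).zip rest).foldl
      (fun result pw => result ++ List.replicate pw.1.length '*' ++ pw.2) w0)

-- ===== PRECONDITION & SPEC =====
def Spec_troca_asteriscos (palavra : String) (out : String) : Prop := out = troca_asteriscos_alt palavra
instance (palavra : String) (out : String) : Decidable (Spec_troca_asteriscos palavra out) := by unfold Spec_troca_asteriscos; infer_instance

-- ===== CLAIM (what is proved, stated in full; the proofs are below) =====
def Claim_equal_troca_asteriscos : Prop := ∀ (palavra : String), Dom_troca_asteriscos palavra → Spec_troca_asteriscos palavra (troca_asteriscos palavra)

-- ===== LEMMAS AND PROOFS =====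

-- the list of space-separated pieces of cs (what str.split(" ") returns)
def pvS : List Char → List (List Char)
  | [] => [[]]
  | c :: cs =>
    if c = ' ' then [] :: pvS cs
    else
      match pvS cs with
      | [] => [[c]]
      | w :: ws => (c :: w) :: ws

theorem pvS_ne_nil (cs : List Char) : pvS cs ≠ [] := by
  cases cs with
  | nil => simp [pvS]
  | cons c cs =>
    simp only [pvS]
    split
    · simp
    · split <;> simp

-- A's remaining output when k characters of the current word are already accumulated
def pvF : Nat → List Char → List Char
  | _, [] => []
  | k, c :: cs =>
    if c = ' ' then List.replicate k '*' ++ pvF 0 cs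
    else c :: pvF (k + 1) cs

-- the output read off the word list (k = length already credited to the first word)
def pvH : Nat → List (List Char) → List Char
  | _, [] => []
  | _, [w] => w
  | k, w :: ws => w ++ List.replicate (k + w.length) '*' ++ pvH 0 ws

theorem pv_loopA (cs : List Char) (nova ant : List Char) :
    (cs.foldl
      (fun (st : List Char × List Char) elemento =>
        if elemento = ' ' then
          ((PySem.List.pyRange 0 (st.2.length : Int) 1).foldl (fun nv _ => nv ++ ['*']) st.1, [])
        else
          (st.1 ++ [elemento], st.2 ++ [elemento]))
      (nova, ant)).1 = nova ++ pvF ant.length cs := by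
  induction cs generalizing nova ant with
  | nil => simp [pvF]
  | cons c cs ih =>
    rw [List.foldl_cons]
    by_cases h : c = ' '
    · have hstep :
        (if c = ' ' then
          ((PySem.List.pyRange 0 (((nova, ant).2.length : Nat) : Int) 1).foldl
            (fun nv _ => nv ++ ['*']) (nova, ant).1, ([] : List Char))
        else ((nova, ant).1 ++ [c], (nova, ant).2 ++ [c]))
          = (nova ++ List.replicate ant.length '*', ([] : List Char)) := by
        simp [h]
      rw [hstep, ih]
      simp [pvF, h]
    · have hstep :
        (if c = ' ' then
          ((PySem.List.pyRange 0 (((nova, ant).2.length : Nat) : Int) 1).foldl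
            (fun nv _ => nv ++ ['*']) (nova, ant).1, ([] : List Char))
        else ((nova, ant).1 ++ [c], (nova, ant).2 ++ [c]))
          = (nova ++ [c], ant ++ [c]) := by
        simp [h]
      rw [hstep, ih]
      simp [pvF, h]

theorem pvF_eq_pvH (cs : List Char) (k : Nat) : pvF k cs = pvH k (pvS cs) := by
  induction cs generalizing k with
  | nil => simp [pvF, pvS, pvH]
  | cons c cs ih =>
    obtain ⟨w, ws, hws⟩ := List.exists_cons_of_ne_nil (pvS_ne_nil cs)
    by_cases h : c = ' '
    · subst h
      simp [pvF, pvS, hws, pvH, ih]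
    · cases ws with
      | nil => simp [pvF, pvS, h, hws, pvH, ih]
      | cons w' ws' =>
        have hS : pvS (c :: cs) = (c :: w) :: w' :: ws' := by simp [pvS, h, hws]
        simp only [pvF, if_neg h, ih, hws, hS, pvH, List.length_cons]
        have : k + 1 + w.length = k + (w.length + 1) := by omega
        simp [this]

theorem pv_foldB (l : List (List Char × List Char)) (acc : List Char) :
    l.foldl (fun result pw => result ++ List.replicate pw.1.length '*' ++ pw.2) acc
      = acc ++ l.flatMap (fun pw => List.replicate pw.1.length '*' ++ pw.2) := by
  simp only [List.append_assoc]
  exact PySem.List.foldl_append_eq_flatMap _ l acc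

theorem pvH_eq_fold (ws : List (List Char)) (w : List Char) :
    pvH 0 (w :: ws)
      = ((w :: ws).zip ws).foldl
          (fun result pw => result ++ List.replicate pw.1.length '*' ++ pw.2) w := by
  induction ws generalizing w with
  | nil => simp [pvH]
  | cons w' ws ih =>
    rw [List.zip_cons_cons, List.foldl_cons, pv_foldB]
    simp only [pvH, ih w', pv_foldB]
    simp [List.append_assoc]

theorem pv_go_cons (fuel : Nat) (c : Char) (rest cur : List Char) (acc : List (List Char)) :
    PySem.Chars.splitOn.go [' '] (fuel + 1) (c :: rest) cur acc
      = if c = ' ' then PySem.Chars.splitOn.go [' '] fuel rest [] (cur.reverse :: acc)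
        else PySem.Chars.splitOn.go [' '] fuel rest (c :: cur) acc := by
  rw [PySem.Chars.splitOn.go]
  by_cases h : c = ' '
  · subst h; simp [List.isPrefixOf]
  · simp only [List.isPrefixOf, Bool.and_eq_true, beq_iff_eq]
    rw [if_neg (by simp; intro hh; exact absurd hh.symm h), if_neg h]

theorem pv_go (fuel : Nat) (l cur : List Char) (acc : List (List Char)) (h : l.length ≤ fuel) :
    PySem.Chars.splitOn.go [' '] fuel l cur acc
      = acc.reverse ++ (match pvS l with
          | [] => []
          | w :: ws => (cur.reverse ++ w) :: ws) := by
  induction fuel generalizing l cur acc with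
  | zero =>
    have hl : l = [] := List.length_eq_zero_iff.mp (Nat.le_zero.mp h)
    subst hl
    rw [PySem.Chars.splitOn.go] <;> simp [pvS]
  | succ fuel ih =>
    cases l with
    | nil =>
      rw [PySem.Chars.splitOn.go] <;> simp [pvS]
    | cons c rest =>
      have hrest : rest.length ≤ fuel := by simpa using h
      obtain ⟨w, ws, hws⟩ := List.exists_cons_of_ne_nil (pvS_ne_nil rest)
      rw [pv_go_cons]
      by_cases hc : c = ' '
      · rw [if_pos hc, ih rest [] (cur.reverse :: acc) hrest]
        subst hc
        simp [pvS, hws]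
      · rw [if_neg hc, ih rest (c :: cur) acc hrest]
        simp [pvS, hc, hws]

theorem pv_splitOn_eq_pvS (cs : List Char) :
    PySem.Chars.splitOn cs [' '] = pvS cs := by
  rw [PySem.Chars.splitOn, pv_go (cs.length + 1) cs [] [] (by omega)]
  obtain ⟨w, ws, hws⟩ := List.exists_cons_of_ne_nil (pvS_ne_nil cs)
  simp [hws]

-- ===== VERDICT (by name: the statement is the Claim_ definition above) =====
theorem troca_asteriscos_spec : Claim_equal_troca_asteriscos := by
  intro palavra _
  unfold Spec_troca_asteriscos troca_asteriscos troca_asteriscos_alt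
  obtain ⟨w, ws, hws⟩ := List.exists_cons_of_ne_nil (pvS_ne_nil palavra.toList)
  simp only [pv_splitOn_eq_pvS, hws, pv_loopA, List.nil_append, List.length_nil]
  rw [pvF_eq_pvH, hws, pvH_eq_fold]
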